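-- pv_equiv track=rewrite | github.com/Banger-Dev/outilcate | streamlit_app.py | categoriser_mots_cles
-- ===== SOURCE A (Python) =====
-- def categoriser_mots_cles(mots_cles, categories):
--     """
--     Catégorise les mots clés en fonction des thématiques.
--
--     Args:
--     - mots_cles: List of str, les mots clés à catégoriser.
--     - categories: Dict, les thématiques et leurs mots clés associés.
--
--     Returns:
--     - Dict, les mots clés catégorisés par thématique.
--     """
--     categorisation = {categorie: [] for categorie in categories}
--
--     for mot in mots_cles:
--         trouve = False
--         for categorie, mots_cles_pertinents in categories.items():
--             if mot in mots_cles_pertinents: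
--                 categorisation[categorie].append(mot)
--                 trouve = True
--                 break
--         if not trouve:
--             if "Autres" not in categorisation:
--                 categorisation["Autres"] = []
--             categorisation["Autres"].append(mot)
--
--     return categorisation
-- ===== SOURCE B (Python) =====
-- def categoriser_mots_cles(mots_cles, categories):
--     # Build a first-match index once, then assign each keyword by one O(1) lookup.
--     index = {}
--     for categorie, pertinents in categories.items():
--         for mot in pertinents:
--             index.setdefault(mot, categorie)
--     categorisation = {categorie: [] for categorie in categories}
--     for mot in mots_cles:
--         cat = index.get(mot, "Autres")
--         if cat not in categorisation:
--             categorisation[cat] = []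
--         categorisation[cat].append(mot)
--     return categorisation
-- ===== Notes on version B (the rewrite author's own statement) =====
-- stated objective: faster
-- what changed: B precomputes a keyword-to-first-matching-category hash index in one pass over the categories, replacing A's inner scan over all categories (and their keyword lists) for every keyword with an O(1) dictionary lookup.
import Mathlib
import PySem

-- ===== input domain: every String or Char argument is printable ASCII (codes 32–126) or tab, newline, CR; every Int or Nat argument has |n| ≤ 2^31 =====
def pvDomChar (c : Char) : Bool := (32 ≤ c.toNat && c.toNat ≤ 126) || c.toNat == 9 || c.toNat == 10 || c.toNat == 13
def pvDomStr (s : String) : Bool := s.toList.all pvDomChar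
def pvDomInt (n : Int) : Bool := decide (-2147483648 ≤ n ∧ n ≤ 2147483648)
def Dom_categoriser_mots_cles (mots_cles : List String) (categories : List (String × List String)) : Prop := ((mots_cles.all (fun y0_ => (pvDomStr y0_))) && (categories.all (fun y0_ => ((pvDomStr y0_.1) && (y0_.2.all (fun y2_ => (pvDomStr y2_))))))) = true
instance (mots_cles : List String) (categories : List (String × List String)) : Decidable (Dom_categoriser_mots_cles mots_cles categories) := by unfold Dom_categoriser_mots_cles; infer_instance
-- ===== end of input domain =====

-- B replaces A's per-keyword scan over all categories by a keyword→category index built once; return value only.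

-- ===== PORT A =====
-- inner 'for categorie, mots_cles_pertinents in categories.items(): … break' loop with its trouve flag:
-- first category whose keyword list contains mot, or none
def pvFirstCat (mot : String) : List (String × List String) → Option String
  | [] => none
  | (categorie, pertinents) :: rest =>
      if pertinents.contains mot then some categorie else pvFirstCat mot rest

def categoriser_mots_cles (mots_cles : List String) (categories : List (String × List String)) : List (String × List String) :=
  let init : PySem.Dict String (List String) :=
    categories.foldl (fun d cp => d.insert cp.1 []) PySem.Dict.empty
  let final := mots_cles.foldl (fun d mot =>
    match pvFirstCat mot categories with
    | some categorie => d.modify categorie [] (fun l => l ++ [mot])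
    | none =>
        let d' := if d.contains "Autres" then d else d.insert "Autres" []
        d'.modify "Autres" [] (fun l => l ++ [mot])) init
  final.items

-- ===== PORT B =====
-- index.setdefault(mot, categorie) over all category keyword lists
def pvIndex (categories : List (String × List String)) : PySem.Dict String String :=
  categories.foldl (fun ix cp => cp.2.foldl (fun ix mot => ix.setdefault mot cp.1) ix) PySem.Dict.empty

def categoriser_mots_cles_alt (mots_cles : List String) (categories : List (String × List String)) : List (String × List String) :=
  let index := pvIndex categories
  let init : PySem.Dict String (List String) :=
    categories.foldl (fun d cp => d.insert cp.1 []) PySem.Dict.empty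
  let final := mots_cles.foldl (fun d mot =>
    let cat := (index.get? mot).getD "Autres"
    let d' := if d.contains cat then d else d.insert cat []
    d'.modify cat [] (fun l => l ++ [mot])) init
  final.items

-- ===== PRECONDITION & SPEC =====
def Spec_categoriser_mots_cles (mots_cles : List String) (categories : List (String × List String)) (out : List (String × List String)) : Prop := out = categoriser_mots_cles_alt mots_cles categories
instance (mots_cles : List String) (categories : List (String × List String)) (out : List (String × List String)) : Decidable (Spec_categoriser_mots_cles mots_cles categories out) := by unfold Spec_categoriser_mots_cles; infer_instance

-- ===== CLAIM (what is proved, stated in full; the proofs are below) =====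
def Claim_equal_categoriser_mots_cles : Prop := ∀ (mots_cles : List String) (categories : List (String × List String)), Dom_categoriser_mots_cles mots_cles categories → Spec_categoriser_mots_cles mots_cles categories (categoriser_mots_cles mots_cles categories)

-- ===== LEMMAS AND PROOFS =====

-- get? after setdefault (no named PySem lemma for setdefault's lookup)
theorem pv_get?_setdefault {κ ν : Type} [BEq κ] [LawfulBEq κ] (d : PySem.Dict κ ν) (k k' : κ) (v : ν) :
    (d.setdefault k v).get? k' = (d.get? k').or (if k' == k then some v else none) := by
  by_cases h : d.contains k = true
  · simp only [PySem.Dict.setdefault, h, if_true]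
    by_cases hk : k' = k
    · subst hk
      have hs : (d.get? k').isSome := by rw [← PySem.Dict.contains_eq_isSome_get?]; exact h
      obtain ⟨w, hw⟩ := Option.isSome_iff_exists.mp hs
      simp [hw]
    · simp [hk]
  · simp only [PySem.Dict.setdefault, h]
    have hn : d.get? k = none := by
      cases hg : d.get? k with
      | none => rfl
      | some w =>
        exfalso
        have := PySem.Dict.contains_eq_isSome_get? d k
        rw [hg] at this; simp at this; exact h this
    have hfn : List.find? (fun p => p.1 == k) d.items = none := by
      have := hn
      simpa [PySem.Dict.get?] using this
    by_cases hk : k' = k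
    · subst hk
      simp [PySem.Dict.get?, List.find?_append, hfn]
    · have hke : ((k : κ) == k') = false := by simp [Ne.symm hk]
      simp [PySem.Dict.get?, List.find?_append, hke, hk]

-- lookup in the dict built by the inner setdefault fold over one keyword list
theorem pv_index_inner (c : String) (mot : String) :
    ∀ (ps : List String) (ix : PySem.Dict String String),
      (ps.foldl (fun ix m => ix.setdefault m c) ix).get? mot
        = (ix.get? mot).or (if ps.contains mot then some c else none) := by
  intro ps
  induction ps with
  | nil => intro ix; simp
  | cons p rest ih =>
    intro ix
    simp only [List.foldl_cons, ih, pv_get?_setdefault, Option.or_assoc]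
    by_cases hp : mot = p
    · subst hp; simp
    · simp [hp]

-- lookup in the full index equals A's first-match scan
theorem pv_index_get? (mot : String) :
    ∀ (categories : List (String × List String)) (ix : PySem.Dict String String),
      ((categories.foldl (fun ix cp => cp.2.foldl (fun ix m => ix.setdefault m cp.1) ix) ix).get? mot)
        = (ix.get? mot).or (pvFirstCat mot categories) := by
  intro categories
  induction categories with
  | nil => intro ix; simp [pvFirstCat]
  | cons cp rest ih =>
    intro ix
    simp only [List.foldl_cons, ih, pv_index_inner, Option.or_assoc, pvFirstCat]
    by_cases hc : mot ∈ cp.2 <;> simp [hc]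

theorem pvIndex_get? (mot : String) (categories : List (String × List String)) :
    (pvIndex categories).get? mot = pvFirstCat mot categories := by
  unfold pvIndex
  rw [pv_index_get?]
  simp [PySem.Dict.get?, PySem.Dict.empty]

-- A's first match names a key of categories
theorem pvFirstCat_mem {mot c : String} :
    ∀ {categories : List (String × List String)}, pvFirstCat mot categories = some c →
      ∃ ps, (c, ps) ∈ categories := by
  intro categories
  induction categories with
  | nil => intro h; simp [pvFirstCat] at h
  | cons cp rest ih =>
    obtain ⟨c1, ps1⟩ := cp
    intro h
    rw [pvFirstCat] at h
    by_cases hc : ps1.contains mot = true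
    · rw [if_pos hc] at h
      exact ⟨ps1, by simp_all⟩
    · rw [if_neg hc] at h
      obtain ⟨ps, hps⟩ := ih h
      exact ⟨ps, List.mem_cons_of_mem _ hps⟩

-- later inserts keep a key present
theorem pv_contains_foldl_insert (k : String) :
    ∀ (cats : List (String × List String)) (d : PySem.Dict String (List String)),
      d.contains k = true →
      (cats.foldl (fun d cp => d.insert cp.1 []) d).contains k = true := by
  intro cats
  induction cats with
  | nil => intro d h; exact h
  | cons cp rest ih =>
    intro d h
    exact ih _ (by rw [PySem.Dict.contains_insert]; simp [h])

-- after the initial comprehension every category key is present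
theorem pv_init_contains :
    ∀ (cats : List (String × List String)) (d : PySem.Dict String (List String)) (cp : String × List String),
      cp ∈ cats →
      (cats.foldl (fun d cp => d.insert cp.1 []) d).contains cp.1 = true := by
  intro cats
  induction cats with
  | nil => intro d cp h; cases h
  | cons hd tl ih =>
    intro d cp h
    rcases List.mem_cons.mp h with h | h
    · subst h
      exact pv_contains_foldl_insert _ tl _ (by rw [PySem.Dict.contains_insert]; simp)
    · exact ih _ cp h

-- the two per-keyword loops agree while every category key is present
theorem pv_main_fold (categories : List (String × List String)) :
    ∀ (mots : List String) (d : PySem.Dict String (List String)),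
      (∀ cp ∈ categories, d.contains cp.1 = true) →
      mots.foldl (fun d mot =>
          match pvFirstCat mot categories with
          | some categorie => d.modify categorie [] (fun l => l ++ [mot])
          | none =>
              let d' := if d.contains "Autres" then d else d.insert "Autres" []
              d'.modify "Autres" [] (fun l => l ++ [mot])) d
      = mots.foldl (fun d mot =>
          let cat := ((pvIndex categories).get? mot).getD "Autres"
          let d' := if d.contains cat then d else d.insert cat []
          d'.modify cat [] (fun l => l ++ [mot])) d := by
  intro mots
  induction mots with
  | nil => intro d _; rfl
  | cons mot rest ih =>
    intro d hinv
    simp only [List.foldl_cons]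
    have hstep : (match pvFirstCat mot categories with
        | some categorie => d.modify categorie [] (fun l => l ++ [mot])
        | none =>
            let d' := if d.contains "Autres" then d else d.insert "Autres" []
            d'.modify "Autres" [] (fun l => l ++ [mot]))
        = (let cat := ((pvIndex categories).get? mot).getD "Autres"
           let d' := if d.contains cat then d else d.insert cat []
           d'.modify cat [] (fun l => l ++ [mot])) := by
      rw [pvIndex_get?]
      cases h : pvFirstCat mot categories with
      | some c =>
        obtain ⟨ps, hps⟩ := pvFirstCat_mem h
        have hc := hinv (c, ps) hps
        simp at hc
        simp [hc]
      | none => simp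
    rw [hstep]
    refine ih _ (fun cp hcp => ?_)
    by_cases ha : d.contains (((pvIndex categories).get? mot).getD "Autres") = true <;>
      simp [ha, PySem.Dict.contains_modify, PySem.Dict.contains_insert, hinv cp hcp]

-- ===== VERDICT (by name: the statement is the Claim_ definition above) =====
theorem categoriser_mots_cles_spec : Claim_equal_categoriser_mots_cles := by
  intro mots_cles categories _
  show categoriser_mots_cles mots_cles categories = categoriser_mots_cles_alt mots_cles categories
  simp only [categoriser_mots_cles, categoriser_mots_cles_alt]
  rw [pv_main_fold categories mots_cles _ (fun cp hcp => pv_init_contains categories _ cp hcp)]
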